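-- pv_equiv track=rewrite | github.com/Lin-Silver/Reverie-Cli | reverie/web.py | _normalize_enabled_adapters
-- ===== SOURCE A (Python) =====
-- from typing import Any, Dict, List, Optional
--
-- WEB_EXCLUDED_ADAPTER_IDS = (
--     "gemini_biz",
--     "gemini_biz_text",
--     "sora",
--     "test",
--     "zenmux_ai_text",
-- )
--
-- WEB_ALLOWED_ADAPTER_IDS = (
--     "chatgpt",
--     "chatgpt_text",
--     "deepseek_text",
--     "doubao",
--     "doubao_text",
--     "gemini",
--     "gemini_text",
--     "google_flow",
--     "nanobananafree_ai",
--     "zai_is",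
--     "zai_is_text",
-- )
--
-- def _normalize_string(value: Any) -> str:
--     return str(value or "").strip()
--
-- def _normalize_enabled_adapters(value: Any) -> List[str]:
--     selected: List[str] = []
--     if isinstance(value, list):
--         for item in value:
--             adapter_id = _normalize_string(item).lower()
--             if not adapter_id or adapter_id in WEB_EXCLUDED_ADAPTER_IDS:
--                 continue
--             if adapter_id not in WEB_ALLOWED_ADAPTER_IDS:
--                 continue
--             if adapter_id not in selected:
--                 selected.append(adapter_id)
--     if not selected:
--         selected = list(WEB_ALLOWED_ADAPTER_IDS)
--     return selected
-- ===== SOURCE B (Python) =====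
-- from typing import Any, List
--
-- WEB_EXCLUDED_ADAPTER_IDS = (
--     "gemini_biz",
--     "gemini_biz_text",
--     "sora",
--     "test",
--     "zenmux_ai_text",
-- )
--
-- WEB_ALLOWED_ADAPTER_IDS = (
--     "chatgpt",
--     "chatgpt_text",
--     "deepseek_text",
--     "doubao",
--     "doubao_text",
--     "gemini",
--     "gemini_text",
--     "google_flow",
--     "nanobananafree_ai",
--     "zai_is",
--     "zai_is_text",
-- )
--
-- def _normalize_string(value: Any) -> str:
--     return str(value or "").strip()
--
-- def _normalize_enabled_adapters(value: Any) -> List[str]: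
--     # Inverted traversal: instead of scanning the input and filtering/deduping,
--     # loop over the fixed allowed-id catalogue, locate each id's first occurrence
--     # in the normalized input, and order the found ids by that position.
--     norm = [_normalize_string(item).lower() for item in value] if isinstance(value, list) else []
--     hits = []
--     for aid in WEB_ALLOWED_ADAPTER_IDS:
--         try:
--             hits.append((norm.index(aid), aid))
--         except ValueError:
--             pass
--     hits.sort(key=lambda t: t[0])
--     selected = [aid for _, aid in hits]
--     return selected or list(WEB_ALLOWED_ADAPTER_IDS)
-- ===== Notes on version B (the rewrite author's own statement) =====
-- stated objective: alternative
-- what changed: Inverts the traversal: instead of A's single scan over the input with filter guards and a linear not-in-selected dedup, B loops over the fixed allowed-id catalogue, looks up each id's first occurrence position in the normalized input with list.index, and sorts the found ids by that position.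
import Mathlib
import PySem

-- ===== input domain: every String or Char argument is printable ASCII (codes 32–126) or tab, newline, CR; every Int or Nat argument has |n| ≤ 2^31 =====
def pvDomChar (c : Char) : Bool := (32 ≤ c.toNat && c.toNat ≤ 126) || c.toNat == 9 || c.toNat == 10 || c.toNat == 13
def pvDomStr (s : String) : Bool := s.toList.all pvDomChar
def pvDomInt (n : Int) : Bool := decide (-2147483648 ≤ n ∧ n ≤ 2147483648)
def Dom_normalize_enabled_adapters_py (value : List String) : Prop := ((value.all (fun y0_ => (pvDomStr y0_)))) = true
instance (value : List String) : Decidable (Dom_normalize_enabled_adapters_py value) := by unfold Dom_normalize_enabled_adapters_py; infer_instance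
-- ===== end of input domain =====

-- B inverts the traversal: it loops over the fixed allowed-id catalogue, finds each id's
-- first occurrence in the normalized input, and orders the found ids by position; objective: alternative.

-- WEB_EXCLUDED_ADAPTER_IDS / WEB_ALLOWED_ADAPTER_IDS (module constants)
def pvExcludedAdapterIds : List String :=
  ["gemini_biz", "gemini_biz_text", "sora", "test", "zenmux_ai_text"]

def pvAllowedAdapterIds : List String :=
  ["chatgpt", "chatgpt_text", "deepseek_text", "doubao", "doubao_text", "gemini",
   "gemini_text", "google_flow", "nanobananafree_ai", "zai_is", "zai_is_text"]

-- _normalize_string: str(value or "").strip(); on a String argument 'value or ""'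
-- is value itself unless value == "" (and strip("") = ""), so this is exact.
def pvNormalizeString (item : String) : String :=
  PySem.Str.strip (if item = "" then "" else item)

-- ===== PORT A =====
-- the body of A's 'for item in value' loop, step for step (selected is the accumulator)
def pvLoopBodyA (selected : List String) (item : String) : List String :=
  let adapter_id := PySem.Str.lower (pvNormalizeString item)
  if adapter_id = "" ∨ adapter_id ∈ pvExcludedAdapterIds then selected
  else if adapter_id ∉ pvAllowedAdapterIds then selected
  else if adapter_id ∉ selected then selected ++ [adapter_id] else selected

-- 'isinstance(value, list)' always holds on the typed argument List String
def normalize_enabled_adapters_py (value : List String) : List String :=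
  let selected := value.foldl pvLoopBodyA []
  if selected = [] then pvAllowedAdapterIds else selected

-- ===== PORT B =====
-- the normalized input (B's 'norm' comprehension; isinstance holds on List String)
def pvNormB (value : List String) : List String :=
  value.map (fun item => PySem.Str.lower (pvNormalizeString item))

-- B's try/except loop over the allowed catalogue: keep (norm.index(aid), aid) when index succeeds
def pvHitsB (norm : List String) : List (Nat × String) :=
  pvAllowedAdapterIds.filterMap (fun aid => (PySem.List.index? norm aid).map (fun i => (i, aid)))

def normalize_enabled_adapters_py_alt (value : List String) : List String :=
  let norm := pvNormB value
  let hits := pvHitsB norm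
  let selected := (PySem.List.sorted hits (fun t => t.1) false).map (fun t => t.2)
  if selected = [] then pvAllowedAdapterIds else selected

-- ===== PRECONDITION & SPEC =====
def Spec_normalize_enabled_adapters_py (value : List String) (out : List String) : Prop := out = normalize_enabled_adapters_py_alt value
instance (value : List String) (out : List String) : Decidable (Spec_normalize_enabled_adapters_py value out) := by unfold Spec_normalize_enabled_adapters_py; infer_instance

-- ===== CLAIM (what is proved, stated in full; the proofs are below) =====
def Claim_equal_normalize_enabled_adapters_py : Prop := ∀ (value : List String), Dom_normalize_enabled_adapters_py value → Spec_normalize_enabled_adapters_py value (normalize_enabled_adapters_py value)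

-- ===== LEMMAS AND PROOFS =====

-- every allowed id is nonempty and not excluded, so A's first two guards
-- are decided by the allowed-membership test alone
theorem pv_allowed_not_excluded {a : String} (h : a ∈ pvAllowedAdapterIds) :
    ¬(a = "" ∨ a ∈ pvExcludedAdapterIds) := by
  simp only [pvAllowedAdapterIds, List.mem_cons, List.not_mem_nil, or_false] at h
  rcases h with h | h | h | h | h | h | h | h | h | h | h <;> subst h <;>
    simp [pvExcludedAdapterIds]

theorem pv_step_allowed {sel : List String} {x : String}
    (hall : PySem.Str.lower (pvNormalizeString x) ∈ pvAllowedAdapterIds) :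
    pvLoopBodyA sel x = PySem.Set.add sel (PySem.Str.lower (pvNormalizeString x)) := by
  have hne := pv_allowed_not_excluded hall
  by_cases hmem : PySem.Str.lower (pvNormalizeString x) ∈ sel <;>
    simp [pvLoopBodyA, PySem.Set.add, hne, hall, hmem]

theorem pv_step_not_allowed {sel : List String} {x : String}
    (hall : PySem.Str.lower (pvNormalizeString x) ∉ pvAllowedAdapterIds) :
    pvLoopBodyA sel x = sel := by
  by_cases hexc : PySem.Str.lower (pvNormalizeString x) = ""
      ∨ PySem.Str.lower (pvNormalizeString x) ∈ pvExcludedAdapterIds <;>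
    simp [pvLoopBodyA, hexc, hall]

-- A's loop over xs from accumulator sel is Set.update sel (the allowed-filtered normalization)
theorem pv_loop_eq_update (xs : List String) (sel : List String) :
    xs.foldl pvLoopBodyA sel
    = PySem.Set.update sel
        ((xs.map (fun item => PySem.Str.lower (pvNormalizeString item))).filter
          (fun aid => decide (aid ∈ pvAllowedAdapterIds))) := by
  induction xs generalizing sel with
  | nil => simp [PySem.Set.update]
  | cons x xs ih =>
    rw [List.foldl_cons, List.map_cons, List.filter_cons]
    by_cases hall : PySem.Str.lower (pvNormalizeString x) ∈ pvAllowedAdapterIds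
    · rw [pv_step_allowed hall, if_pos (by simpa using hall), ih]
      rfl
    · rw [pv_step_not_allowed hall, if_neg (by simpa using hall), ih]

-- first-occurrence index in xs, as a Nat (for elements of xs index? is some)
def pvIdx (xs : List String) (a : String) : Nat := (PySem.List.index? xs a).getD 0

-- dedup over an appended singleton
theorem pv_dedup_append_singleton (l : List String) (c : String) :
    PySem.List.dedup (l ++ [c])
    = if c ∈ PySem.List.dedup l then PySem.List.dedup l else PySem.List.dedup l ++ [c] := by
  simp only [PySem.List.dedup_eq_ofList, PySem.Set.ofList_append_singleton, PySem.Set.add_eq_ite]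

-- dedup of the filtered list is strictly ordered by first-occurrence index in xs
theorem pv_dedup_filter_pairwise (p : String → Bool) (xs : List String) :
    (PySem.List.dedup (xs.filter p)).Pairwise (fun a b => pvIdx xs a < pvIdx xs b) := by
  induction xs using List.reverseRecOn with
  | nil => simp [PySem.List.dedup_eq_ofList, PySem.Set.ofList]
  | append_singleton l c ih =>
    have hmem : ∀ a ∈ PySem.List.dedup (l.filter p), a ∈ l := by
      intro a ha
      rw [PySem.List.mem_dedup] at ha
      exact (List.mem_filter.mp ha).1
    have hidx : ∀ a ∈ l, pvIdx (l ++ [c]) a = pvIdx l a := by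
      intro a ha
      unfold pvIdx
      rw [PySem.List.index?_append_of_mem _ ha]
    have htrans : (PySem.List.dedup (l.filter p)).Pairwise
        (fun a b => pvIdx (l ++ [c]) a < pvIdx (l ++ [c]) b) := by
      refine ih.imp_of_mem ?_
      intro a b ha hb h
      rw [hidx a (hmem a ha), hidx b (hmem b hb)]
      exact h
    rw [List.filter_append]
    by_cases hpc : p c = true
    · rw [List.filter_singleton, hpc, cond_true, pv_dedup_append_singleton]
      by_cases hc : c ∈ PySem.List.dedup (l.filter p)
      · rw [if_pos hc]; exact htrans
      · rw [if_neg hc]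
        have hcl : c ∉ l := by
          intro hcl
          exact hc (by rw [PySem.List.mem_dedup]; exact List.mem_filter.mpr ⟨hcl, hpc⟩)
        rw [List.pairwise_append]
        refine ⟨htrans, List.pairwise_singleton _ _, ?_⟩
        intro a ha b hb
        rw [List.mem_singleton] at hb
        rw [hb]
        have hal := hmem a ha
        obtain ⟨i, hi⟩ := Option.isSome_iff_exists.mp ((PySem.List.index?_isSome_iff l a).mpr hal)
        obtain ⟨hk, -, -⟩ := PySem.List.getElem_of_index?_eq_some hi
        have h1 : pvIdx (l ++ [c]) a = i := by
          unfold pvIdx; rw [PySem.List.index?_append_of_mem _ hal, hi]; rfl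
        have h2 : pvIdx (l ++ [c]) c = l.length := by
          unfold pvIdx; rw [PySem.List.index?_append_singleton_self l c hcl]; rfl
        rw [h1, h2]; exact hk
    · have hpc' : p c = false := by simpa using hpc
      rw [List.filter_singleton, hpc', cond_false, List.append_nil]
      exact htrans

-- pairsD (the dedup list tagged with its indices) is a permutation of B's hits
theorem pv_pairs_perm (xs : List String) :
    ((PySem.List.dedup (xs.filter (fun aid => decide (aid ∈ pvAllowedAdapterIds)))).map
        (fun a => (pvIdx xs a, a))).Perm (pvHitsB xs) := by
  rw [List.perm_ext_iff_of_nodup]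
  · intro q
    constructor
    · intro hq
      obtain ⟨a, ha, rfl⟩ := List.mem_map.mp hq
      rw [PySem.List.mem_dedup, List.mem_filter] at ha
      obtain ⟨haxs, hall⟩ := ha
      obtain ⟨i, hi⟩ := Option.isSome_iff_exists.mp ((PySem.List.index?_isSome_iff xs a).mpr haxs)
      refine List.mem_filterMap.mpr ⟨a, by simpa using hall, ?_⟩
      rw [hi]
      have : pvIdx xs a = i := by unfold pvIdx; rw [hi]; rfl
      rw [this]; rfl
    · intro hq
      obtain ⟨a, ha, hfa⟩ := List.mem_filterMap.mp hq
      obtain ⟨i, hi, rfl⟩ := Option.map_eq_some_iff.mp hfa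
      have haxs : a ∈ xs := (PySem.List.index?_isSome_iff xs a).mp (by rw [hi]; rfl)
      refine List.mem_map.mpr ⟨a, ?_, ?_⟩
      · rw [PySem.List.mem_dedup, List.mem_filter]
        exact ⟨haxs, by simpa using ha⟩
      · have : pvIdx xs a = i := by unfold pvIdx; rw [hi]; rfl
        rw [this]
  · refine List.Nodup.map ?_ (PySem.List.nodup_dedup _)
    intro a b h
    exact congrArg Prod.snd h
  · refine List.Nodup.filterMap ?_ (by decide)
    intro a a' b hb hb'
    obtain ⟨i, -, rfl⟩ := Option.map_eq_some_iff.mp hb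
    obtain ⟨j, -, hj⟩ := Option.map_eq_some_iff.mp hb'
    exact (congrArg Prod.snd hj).symm

-- the central equation: A's dedup-filter equals B's sort-by-first-index
theorem pv_main (xs : List String) :
    PySem.List.dedup (xs.filter (fun aid => decide (aid ∈ pvAllowedAdapterIds)))
    = (PySem.List.sorted (pvHitsB xs) (fun t => t.1) false).map (fun t => t.2) := by
  have hpw : ((PySem.List.dedup (xs.filter (fun aid => decide (aid ∈ pvAllowedAdapterIds)))).map
      (fun a => (pvIdx xs a, a))).Pairwise (fun s t => s.1 < t.1) := by
    rw [List.pairwise_map]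
    exact pv_dedup_filter_pairwise _ xs
  rw [PySem.List.sorted_eq_of_perm_of_pairwise_lt _ _ _ (pv_pairs_perm xs) hpw, List.map_map]
  exact (List.map_id' _).symm

-- ===== VERDICT (by name: the statement is the Claim_ definition above) =====
theorem normalize_enabled_adapters_py_spec : Claim_equal_normalize_enabled_adapters_py := by
  intro value _
  show normalize_enabled_adapters_py value = normalize_enabled_adapters_py_alt value
  unfold normalize_enabled_adapters_py normalize_enabled_adapters_py_alt
  rw [pv_loop_eq_update, PySem.Set.update_nil_left, ← PySem.List.dedup_eq_ofList]
  simp only [pvNormB]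
  rw [pv_main]
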